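-- pv_equiv track=rewrite | github.com/samarth4149/open_flamingo | caption_evaluate.py | create_html_page
-- ===== SOURCE A (Python) =====
-- def create_html_page(triplets):
--     """
--     Creates an HTML page to visualize the triplets.
--
--     Args:
--     triplets: A list of triplets. Each triplet is a tuple (image_path, predictions, labels), where
--         - image_path is a string path to the image file
--         - predictions is a list of predicted labels (strings)
--         - labels is a list of ground truth labels (strings)
--
--     Returns:
--     An HTML string.
--     """
--     html = ["<html><body><table>"]
--
--     # add a row for every 3 triplets
--     for i in range(0, len(triplets), 3):
--         html.append("<tr>")
--         for j in range(3):
--             if i + j < len(triplets):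
--                 image_path, caption, predictions, labels = triplets[i + j]
--                 html.append("<td>")
--                 html.append(f'<img src="file://{image_path}" width="300" height="300"><br>')
--                 html.append("Predictions:<br>")
--                 html.append(caption + '----' +', '.join(predictions))
--                 html.append("<br>")
--                 html.append("Labels:<br>")
--                 html.append(', '.join(labels))
--                 html.append("</td>")
--         html.append("</tr>")
--
--     html.append("</table></body></html>")
--
--     return "\n".join(html)
-- ===== SOURCE B (Python) =====
-- def create_html_page(triplets):
--     """Builds the same HTML table by structural recursion on rows of up to 3
--     triplets (no index arithmetic, no bounds guard)."""
--     def rows(ts):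
--         if not ts:
--             return []
--         out = ["<tr>"]
--         for image_path, caption, predictions, labels in ts[:3]:
--             out += ["<td>",
--                     f'<img src="file://{image_path}" width="300" height="300"><br>',
--                     "Predictions:<br>",
--                     caption + '----' + ', '.join(predictions),
--                     "<br>",
--                     "Labels:<br>",
--                     ', '.join(labels),
--                     "</td>"]
--         out.append("</tr>")
--         return out + rows(ts[3:])
--
--     return "\n".join(["<html><body><table>"] + rows(triplets) + ["</table></body></html>"])
-- ===== Notes on version B (the rewrite author's own statement) =====
-- stated objective: simpler
-- what changed: Replaces the index-stepping loop (range(0,n,3) with an inner range(3) plus an i+j<n bounds guard and triplets[i+j] lookups) by structural recursion that slices off up to three triplets per row and iterates the elements directly, so no index arithmetic or guard is needed.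
import Mathlib
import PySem

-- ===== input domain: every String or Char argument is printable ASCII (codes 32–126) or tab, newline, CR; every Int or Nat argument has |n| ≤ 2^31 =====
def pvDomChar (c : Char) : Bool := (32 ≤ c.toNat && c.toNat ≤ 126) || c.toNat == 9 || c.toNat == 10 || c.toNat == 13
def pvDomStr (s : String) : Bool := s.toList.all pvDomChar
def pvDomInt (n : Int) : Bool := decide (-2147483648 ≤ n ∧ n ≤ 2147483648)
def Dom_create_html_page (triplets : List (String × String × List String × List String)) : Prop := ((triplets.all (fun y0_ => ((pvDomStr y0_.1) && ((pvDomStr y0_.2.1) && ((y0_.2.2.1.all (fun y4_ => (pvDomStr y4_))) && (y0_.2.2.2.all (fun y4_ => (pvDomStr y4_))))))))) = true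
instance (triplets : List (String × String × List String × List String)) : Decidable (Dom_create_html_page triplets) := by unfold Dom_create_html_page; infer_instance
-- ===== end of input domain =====

-- B replaces A's index-stepping chunk loop by structural recursion over the triplets; objective: simpler (same O(n) cost).


-- ===== PORT A =====
-- Literal port of A: loop over range(0, len(triplets), 3) with an inner range(3) and an
-- i+j < len(triplets) guard; triplets[i+j] via pyGetD (exact: the guard keeps the index in range).
def create_html_page (triplets : List (String × String × List String × List String)) : String :=
  let html : List String := ["<html><body><table>"]
  let html := (PySem.List.pyRange 0 (triplets.length : Int) 3).foldl (fun html i =>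
    let html := html ++ ["<tr>"]
    let html := (PySem.List.pyRange 0 3 1).foldl (fun html j =>
      if i + j < (triplets.length : Int) then
        let t := PySem.List.pyGetD triplets (i + j) ("", "", [], [])
        let html := html ++ ["<td>"]
        let html := html ++ ["<img src=\"file://" ++ t.1 ++ "\" width=\"300\" height=\"300\"><br>"]
        let html := html ++ ["Predictions:<br>"]
        let html := html ++ [t.2.1 ++ "----" ++ PySem.Str.join ", " t.2.2.1]
        let html := html ++ ["<br>"]
        let html := html ++ ["Labels:<br>"]
        let html := html ++ [PySem.Str.join ", " t.2.2.2]
        html ++ ["</td>"]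
      else html) html
    html ++ ["</tr>"]) html
  PySem.Str.join "\n" (html ++ ["</table></body></html>"])

-- ===== PORT B =====
-- Port of Source B's `rows`: structural recursion, one row of up to 3 triplets per call
-- (ts[:3] = take 3, ts[3:] = drop 3 — exact for these nonnegative slice bounds).
def pvRows (ts : List (String × String × List String × List String)) : List String :=
  match ts with
  | [] => []
  | t :: rest =>
      (((t :: rest).take 3).foldl (fun out tr =>
        out ++ ["<td>",
                "<img src=\"file://" ++ tr.1 ++ "\" width=\"300\" height=\"300\"><br>",
                "Predictions:<br>",
                tr.2.1 ++ "----" ++ PySem.Str.join ", " tr.2.2.1,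
                "<br>",
                "Labels:<br>",
                PySem.Str.join ", " tr.2.2.2,
                "</td>"]) ["<tr>"] ++ ["</tr>"])
      ++ pvRows ((t :: rest).drop 3)
termination_by ts.length
decreasing_by simp

def create_html_page_alt (triplets : List (String × String × List String × List String)) : String :=
  PySem.Str.join "\n" (["<html><body><table>"] ++ pvRows triplets ++ ["</table></body></html>"])

-- ===== PRECONDITION & SPEC =====
def Spec_create_html_page (triplets : List (String × String × List String × List String)) (out : String) : Prop := out = create_html_page_alt triplets
instance (triplets : List (String × String × List String × List String)) (out : String) : Decidable (Spec_create_html_page triplets out) := by unfold Spec_create_html_page; infer_instance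

-- ===== CLAIM (what is proved, stated in full; the proofs are below) =====
def Claim_equal_create_html_page : Prop := ∀ (triplets : List (String × String × List String × List String)), Dom_create_html_page triplets → Spec_create_html_page triplets (create_html_page triplets)

-- ===== LEMMAS AND PROOFS =====

theorem pvRange3_nil (a b : Int) (h : b ≤ a) : PySem.List.pyRange a b 3 = [] := by
  rw [PySem.List.pyRange_of_pos a b (by norm_num)]
  simp [if_neg (by omega : ¬ a < b)]

theorem pvRange3_cons (a b : Int) (h : a < b) :
    PySem.List.pyRange a b 3 = a :: PySem.List.pyRange (a + 3) b 3 := by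
  rw [PySem.List.pyRange_of_pos a b (by norm_num), PySem.List.pyRange_of_pos (a+3) b (by norm_num)]
  rw [if_pos h]
  by_cases h3 : a + 3 < b
  · rw [if_pos h3]
    have hc : ((b - a + 3 - 1) / 3).toNat = ((b - (a+3) + 3 - 1) / 3).toNat + 1 := by omega
    rw [hc, List.range_succ_eq_map]
    simp [List.map_map, Function.comp]
    intro k _; ring
  · rw [if_neg h3]
    have hc : ((b - a + 3 - 1) / 3).toNat = 1 := by omega
    simp [hc, List.range_succ]

theorem pvRange013 : PySem.List.pyRange 0 3 1 = [0, 1, 2] := by decide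

theorem pvLoopA (l : List (String × String × List String × List String)) :
    ∀ (m k : Nat) (acc : List String), l.length - k ≤ m →
    (PySem.List.pyRange (k : Int) (l.length : Int) 3).foldl (fun html i =>
      let html := html ++ ["<tr>"]
      let html := (PySem.List.pyRange 0 3 1).foldl (fun html j =>
        if i + j < (l.length : Int) then
          let t := PySem.List.pyGetD l (i + j) ("", "", [], [])
          let html := html ++ ["<td>"]
          let html := html ++ ["<img src=\"file://" ++ t.1 ++ "\" width=\"300\" height=\"300\"><br>"]
          let html := html ++ ["Predictions:<br>"]
          let html := html ++ [t.2.1 ++ "----" ++ PySem.Str.join ", " t.2.2.1]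
          let html := html ++ ["<br>"]
          let html := html ++ ["Labels:<br>"]
          let html := html ++ [PySem.Str.join ", " t.2.2.2]
          html ++ ["</td>"]
        else html) html
      html ++ ["</tr>"]) acc = acc ++ pvRows (l.drop k) := by
  intro m
  induction m with
  | zero =>
    intro k acc h
    rw [pvRange3_nil _ _ (by exact_mod_cast (by omega : l.length ≤ k))]
    rw [List.drop_eq_nil_of_le (by omega)]
    simp [pvRows]
  | succ m ih =>
    intro k acc h
    by_cases hk : l.length ≤ k
    · rw [pvRange3_nil _ _ (by exact_mod_cast hk)]
      rw [List.drop_eq_nil_of_le hk]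
      simp [pvRows]
    · replace hk : k < l.length := by omega
      rw [pvRange3_cons _ _ (by exact_mod_cast hk), List.foldl_cons]
      rw [show ((k:Int) + 3) = (((k+3 : Nat)) : Int) by push_cast; ring]
      rw [ih (k+3) _ (by omega)]
      have key : ∀ j : Nat, PySem.List.pyGetD l ((k:Int) + (j:Int)) ("", "", [], [])
          = ((l.drop k)[j]?).getD ("", "", [], []) := by
        intro j
        rw [show (k:Int) + (j:Int) = (((k+j : Nat)) : Int) by push_cast; ring]
        rw [PySem.List.pyGetD_natCast, List.getD_eq_getElem?_getD, List.getElem?_drop]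
      have hdd : l.drop (k+3) = (l.drop k).drop 3 := by
        rw [List.drop_drop]
      have hlen : (l.drop k).length = l.length - k := by simp
      rcases hD : l.drop k with _ | ⟨t1, rest⟩
      · exfalso; rw [hD] at hlen; simp at hlen; omega
      · rw [hD] at hdd hlen
        rcases rest with _ | ⟨t2, rest2⟩
        · -- one element left : k+1 = l.length
          have h1 : l.length = k + 1 := by simp at hlen; omega
          simp only [pvRange013, List.foldl_cons, List.foldl_nil]
          have c0 : (k:Int) + (0:Int) < (l.length:Int) := by omega
          have c1 : ¬ ((k:Int) + (1:Int) < (l.length:Int)) := by omega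
          have c2 : ¬ ((k:Int) + (2:Int) < (l.length:Int)) := by omega
          rw [if_pos c0, if_neg c1, if_neg c2]
          have e0 := key 0; rw [hD] at e0; simp at e0
          rw [show ((k:Int) + (0:Int)) = (k:Int) + ((0:Nat):Int) by norm_num] at *
          simp only [pvRows, hdd, List.drop_succ_cons, List.take_succ_cons, List.take_nil,
            List.drop_nil, List.foldl_cons, List.foldl_nil]
          rw [key 0, hD]
          simp
        · rcases rest2 with _ | ⟨t3, rest3⟩
          · have h1 : l.length = k + 2 := by simp at hlen; omega
            simp only [pvRange013, List.foldl_cons, List.foldl_nil]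
            have c0 : (k:Int) + (0:Int) < (l.length:Int) := by omega
            have c1 : (k:Int) + (1:Int) < (l.length:Int) := by omega
            have c2 : ¬ ((k:Int) + (2:Int) < (l.length:Int)) := by omega
            rw [if_pos c0, if_pos c1, if_neg c2]
            simp only [pvRows, hdd, List.drop_succ_cons, List.take_succ_cons, List.take_nil,
              List.drop_nil, List.foldl_cons, List.foldl_nil]
            rw [show ((k:Int) + (1:Int)) = (k:Int) + ((1:Nat):Int) by norm_num, key 1]
            rw [show ((k:Int) + (0:Int)) = (k:Int) + ((0:Nat):Int) by norm_num, key 0, hD]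
            simp
          · have h1 : k + 3 ≤ l.length := by simp at hlen; omega
            simp only [pvRange013, List.foldl_cons, List.foldl_nil]
            have c0 : (k:Int) + (0:Int) < (l.length:Int) := by omega
            have c1 : (k:Int) + (1:Int) < (l.length:Int) := by omega
            have c2 : (k:Int) + (2:Int) < (l.length:Int) := by omega
            rw [if_pos c0, if_pos c1, if_pos c2]
            simp only [pvRows, hdd, List.drop_succ_cons, List.take_succ_cons, List.foldl_cons]
            rw [show ((k:Int) + (1:Int)) = (k:Int) + ((1:Nat):Int) by norm_num, key 1]
            rw [show ((k:Int) + (2:Int)) = (k:Int) + ((2:Nat):Int) by norm_num, key 2]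
            rw [show ((k:Int) + (0:Int)) = (k:Int) + ((0:Nat):Int) by norm_num, key 0, hD]
            simp

-- ===== VERDICT (by name: the statement is the Claim_ definition above) =====
theorem create_html_page_spec : Claim_equal_create_html_page := by
  intro l _
  unfold Spec_create_html_page create_html_page create_html_page_alt
  dsimp only
  have h := pvLoopA l l.length 0 ["<html><body><table>"] (by omega)
  simp only [Nat.cast_zero, List.drop_zero] at h
  rw [h]
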